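-- pv_equiv track=rewrite | github.com/sgttomas/chirality-piping | core/reporting/state_comparison_handoff_sections/engine.py | _sow_024_coverage
-- ===== SOURCE A (Python) =====
-- from typing import Any, Mapping
--
-- def _sow_024_coverage(state_sections: list[dict[str, Any]], comparison_sections: list[dict[str, Any]], handoff_sections: list[dict[str, Any]]) -> dict[str, str]:
--     all_sections = state_sections + comparison_sections + handoff_sections
--     return {
--         "inputs": "represented_by_state_run_and_handoff_references" if state_sections or handoff_sections else "TBD",
--         "sources": "represented_by_source_provenance_and_source_notes" if all_sections else "TBD",
--         "warnings": "represented_by_warning_and_diagnostic_lists" if any(item.get("warnings") or item.get("diagnostics") for item in all_sections) else "TBD",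
--         "assumptions": "represented_by_assumption_lists" if any(item.get("assumptions") or item.get("unresolved_assumptions") for item in all_sections) else "TBD",
--         "results": "represented_by_result_refs_and_unit_normalized_deltas" if state_sections or comparison_sections else "TBD",
--         "rule_pack_checksums": "represented_by_rule_pack_refs_without_private_payloads" if any(item.get("rule_pack_refs") for item in all_sections) else "TBD",
--         "limitations": "represented_by_limitations_and_unresolved_tbds",
--     }
-- ===== SOURCE B (Python) =====
-- def _sow_024_coverage(state_sections, comparison_sections, handoff_sections):
--     any_section = False
--     has_warn = False
--     has_assum = False
--     has_rpr = False
--     for group in (state_sections, comparison_sections, handoff_sections):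
--         for item in group:
--             any_section = True
--             if item.get("warnings") or item.get("diagnostics"):
--                 has_warn = True
--             if item.get("assumptions") or item.get("unresolved_assumptions"):
--                 has_assum = True
--             if item.get("rule_pack_refs"):
--                 has_rpr = True
--     return {
--         "inputs": "represented_by_state_run_and_handoff_references" if state_sections or handoff_sections else "TBD",
--         "sources": "represented_by_source_provenance_and_source_notes" if any_section else "TBD",
--         "warnings": "represented_by_warning_and_diagnostic_lists" if has_warn else "TBD",
--         "assumptions": "represented_by_assumption_lists" if has_assum else "TBD",
--         "results": "represented_by_result_refs_and_unit_normalized_deltas" if state_sections or comparison_sections else "TBD",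
--         "rule_pack_checksums": "represented_by_rule_pack_refs_without_private_payloads" if has_rpr else "TBD",
--         "limitations": "represented_by_limitations_and_unresolved_tbds",
--     }
-- ===== Notes on version B (the rewrite author's own statement) =====
-- stated objective: simpler
-- what changed: Replaces the list concatenation and the three separate any()-comprehension scans with one single pass over the three input lists that maintains four boolean flags, from which the dict is built.
import Mathlib
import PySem

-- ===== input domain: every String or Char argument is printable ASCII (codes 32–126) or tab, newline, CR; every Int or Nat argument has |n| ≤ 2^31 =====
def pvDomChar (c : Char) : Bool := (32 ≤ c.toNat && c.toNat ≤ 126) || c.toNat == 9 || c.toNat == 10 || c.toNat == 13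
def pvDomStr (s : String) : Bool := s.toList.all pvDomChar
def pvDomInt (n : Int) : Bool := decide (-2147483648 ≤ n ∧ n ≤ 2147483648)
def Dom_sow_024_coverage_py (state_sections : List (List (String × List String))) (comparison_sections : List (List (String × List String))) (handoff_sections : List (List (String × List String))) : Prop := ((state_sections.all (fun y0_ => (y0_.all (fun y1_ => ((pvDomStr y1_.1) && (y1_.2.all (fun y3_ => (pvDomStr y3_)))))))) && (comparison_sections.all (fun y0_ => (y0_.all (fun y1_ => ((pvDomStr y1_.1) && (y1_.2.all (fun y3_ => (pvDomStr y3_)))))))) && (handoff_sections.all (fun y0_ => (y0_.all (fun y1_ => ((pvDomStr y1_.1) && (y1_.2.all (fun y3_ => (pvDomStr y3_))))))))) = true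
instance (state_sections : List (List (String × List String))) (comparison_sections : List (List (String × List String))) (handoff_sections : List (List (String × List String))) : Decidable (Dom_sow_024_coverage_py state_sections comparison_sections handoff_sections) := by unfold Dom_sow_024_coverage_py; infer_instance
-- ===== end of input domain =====

-- B replaces A's concatenation + three any() scans by one single pass keeping four boolean flags; same return value.
-- ===== PORT A =====
-- item.get(k) truthiness: present with a non-empty list value
def pvGetTruthy (item : List (String × List String)) (k : String) : Bool :=
  match (PySem.Dict.mk item).get? k with
  | some l => !l.isEmpty
  | none => false

def sow_024_coverage_py (state_sections : List (List (String × List String))) (comparison_sections : List (List (String × List String))) (handoff_sections : List (List (String × List String))) : List (String × String) :=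
  let all_sections := state_sections ++ comparison_sections ++ handoff_sections
  [("inputs", if !state_sections.isEmpty || !handoff_sections.isEmpty then "represented_by_state_run_and_handoff_references" else "TBD"),
   ("sources", if !all_sections.isEmpty then "represented_by_source_provenance_and_source_notes" else "TBD"),
   ("warnings", if all_sections.any (fun item => pvGetTruthy item "warnings" || pvGetTruthy item "diagnostics") then "represented_by_warning_and_diagnostic_lists" else "TBD"),
   ("assumptions", if all_sections.any (fun item => pvGetTruthy item "assumptions" || pvGetTruthy item "unresolved_assumptions") then "represented_by_assumption_lists" else "TBD"),
   ("results", if !state_sections.isEmpty || !comparison_sections.isEmpty then "represented_by_result_refs_and_unit_normalized_deltas" else "TBD"),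
   ("rule_pack_checksums", if all_sections.any (fun item => pvGetTruthy item "rule_pack_refs") then "represented_by_rule_pack_refs_without_private_payloads" else "TBD"),
   ("limitations", "represented_by_limitations_and_unresolved_tbds")]

-- ===== PORT B =====
-- one step of B's single pass: update (any_section, has_warn, has_assum, has_rpr)
def pvStepB (acc : Bool × Bool × Bool × Bool) (item : List (String × List String)) : Bool × Bool × Bool × Bool :=
  (true,
   acc.2.1 || (pvGetTruthy item "warnings" || pvGetTruthy item "diagnostics"),
   acc.2.2.1 || (pvGetTruthy item "assumptions" || pvGetTruthy item "unresolved_assumptions"),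
   acc.2.2.2 || pvGetTruthy item "rule_pack_refs")

def sow_024_coverage_py_alt (state_sections : List (List (String × List String))) (comparison_sections : List (List (String × List String))) (handoff_sections : List (List (String × List String))) : List (String × String) :=
  let flags := handoff_sections.foldl pvStepB (comparison_sections.foldl pvStepB (state_sections.foldl pvStepB (false, false, false, false)))
  [("inputs", if !state_sections.isEmpty || !handoff_sections.isEmpty then "represented_by_state_run_and_handoff_references" else "TBD"),
   ("sources", if flags.1 then "represented_by_source_provenance_and_source_notes" else "TBD"),
   ("warnings", if flags.2.1 then "represented_by_warning_and_diagnostic_lists" else "TBD"),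
   ("assumptions", if flags.2.2.1 then "represented_by_assumption_lists" else "TBD"),
   ("results", if !state_sections.isEmpty || !comparison_sections.isEmpty then "represented_by_result_refs_and_unit_normalized_deltas" else "TBD"),
   ("rule_pack_checksums", if flags.2.2.2 then "represented_by_rule_pack_refs_without_private_payloads" else "TBD"),
   ("limitations", "represented_by_limitations_and_unresolved_tbds")]

-- ===== PRECONDITION & SPEC =====
def Spec_sow_024_coverage_py (state_sections : List (List (String × List String))) (comparison_sections : List (List (String × List String))) (handoff_sections : List (List (String × List String))) (out : List (String × String)) : Prop := out = sow_024_coverage_py_alt state_sections comparison_sections handoff_sections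
instance (state_sections : List (List (String × List String))) (comparison_sections : List (List (String × List String))) (handoff_sections : List (List (String × List String))) (out : List (String × String)) : Decidable (Spec_sow_024_coverage_py state_sections comparison_sections handoff_sections out) := by unfold Spec_sow_024_coverage_py; infer_instance

-- ===== CLAIM (what is proved, stated in full; the proofs are below) =====
def Claim_equal_sow_024_coverage_py : Prop := ∀ (state_sections : List (List (String × List String))) (comparison_sections : List (List (String × List String))) (handoff_sections : List (List (String × List String))), Dom_sow_024_coverage_py state_sections comparison_sections handoff_sections → Spec_sow_024_coverage_py state_sections comparison_sections handoff_sections (sow_024_coverage_py state_sections comparison_sections handoff_sections)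

-- ===== LEMMAS AND PROOFS =====
theorem pvStepB_foldl (l : List (List (String × List String))) (acc : Bool × Bool × Bool × Bool) :
    l.foldl pvStepB acc =
      (acc.1 || !l.isEmpty,
       acc.2.1 || l.any (fun item => pvGetTruthy item "warnings" || pvGetTruthy item "diagnostics"),
       acc.2.2.1 || l.any (fun item => pvGetTruthy item "assumptions" || pvGetTruthy item "unresolved_assumptions"),
       acc.2.2.2 || l.any (fun item => pvGetTruthy item "rule_pack_refs")) := by
  induction l generalizing acc with
  | nil => simp
  | cons x xs ih => simp [pvStepB, ih, Bool.or_assoc]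

-- ===== VERDICT (by name: the statement is the Claim_ definition above) =====
theorem sow_024_coverage_py_spec : Claim_equal_sow_024_coverage_py := by
  intro s c h _
  unfold Spec_sow_024_coverage_py sow_024_coverage_py sow_024_coverage_py_alt
  simp [pvStepB_foldl, Bool.or_assoc]
  simp [imp_iff_not_or]
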